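-- pv_equiv track=rewrite | github.com/sidmishraw/scp | delivery/python_apriori/seqmining.py | _local_freq_items
-- ===== SOURCE A (Python) =====
-- from collections import defaultdict
--
-- def _local_freq_items(sdb, prefix, min_support):
--     #print "in _local_freq_items, sdb is: ", sdb, " prefix is: ", prefix, " min_support is: ", min_support
--     items = defaultdict(int)
--     freq_items = []
--     for entry in sdb:
--         visited = set()
--         for element in entry:
--             if element not in visited:
--                 items[element] += 1
--                 visited.add(element)
--     # Sorted is optional. Just useful for debugging for now.
--     for item in items:
--         support = items[item]
--         if support >= min_support:
--             freq_items.append((item, support))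
--     #print "Frequent items returnung: ", freq_items
--     return freq_items
-- ===== SOURCE B (Python) =====
-- def _local_freq_items(sdb, prefix, min_support):
--     # Stage 1: distinct items in first-appearance order.
--     order = list(dict.fromkeys(x for entry in sdb for x in entry))
--     # Stage 2: item-major counting — support of an item is the number of
--     # sequences containing it; each sequence is turned into a set once.
--     entry_sets = [set(entry) for entry in sdb]
--     freq_items = []
--     for item in order:
--         support = sum(1 for s in entry_sets if item in s)
--         if support >= min_support:
--             freq_items.append((item, support))
--     return freq_items
-- ===== Notes on version B (the rewrite author's own statement) =====
-- stated objective: alternative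
-- what changed: Replaces A's single sequence-major pass (running counter dict plus per-entry visited set) by staged passes: collect the distinct items in first-appearance order (dict.fromkeys of the flattened database), turn each sequence into a set once, then compute each item's support item-major by scanning the sequence sets per item.
import Mathlib
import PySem

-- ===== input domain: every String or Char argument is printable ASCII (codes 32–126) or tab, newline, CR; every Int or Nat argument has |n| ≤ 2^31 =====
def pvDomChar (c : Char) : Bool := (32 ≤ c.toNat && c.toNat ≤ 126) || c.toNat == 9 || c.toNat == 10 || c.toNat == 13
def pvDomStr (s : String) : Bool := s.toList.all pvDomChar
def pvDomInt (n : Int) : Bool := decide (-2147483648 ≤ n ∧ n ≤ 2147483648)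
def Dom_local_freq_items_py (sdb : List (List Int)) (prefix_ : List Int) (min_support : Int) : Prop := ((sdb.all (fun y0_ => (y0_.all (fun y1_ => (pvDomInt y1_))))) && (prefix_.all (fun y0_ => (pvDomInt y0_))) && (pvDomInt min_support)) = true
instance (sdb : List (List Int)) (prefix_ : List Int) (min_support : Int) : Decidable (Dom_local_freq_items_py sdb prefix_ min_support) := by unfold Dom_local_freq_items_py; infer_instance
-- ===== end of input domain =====

-- B replaces A's single sequence-major counting pass (counter dict + per-entry visited set)
-- by two staged passes: ordered dedup of all items, then an item-major support scan per item
-- (objective: alternative; not faster — it re-scans the database once per distinct item).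

-- ===== PORT A =====
-- A's inner loop body: if element not in visited: items[element] += 1; visited.add(element)
def pvStepA (p : PySem.Dict Int Int × PySem.Set Int) (element : Int) :
    PySem.Dict Int Int × PySem.Set Int :=
  if PySem.Set.contains p.2 element then p
  else (p.1.modify element 0 (· + 1), PySem.Set.add p.2 element)

-- literal port of A: counter dict `items` plus per-entry `visited` set, then the
-- filtering append loop over the dict (support = items[item] inlined).
def pvItemsA (sdb : List (List Int)) : PySem.Dict Int Int :=
  sdb.foldl (fun items entry => (entry.foldl pvStepA (items, PySem.Set.empty)).1)
    PySem.Dict.empty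

def local_freq_items_py (sdb : List (List Int)) (prefix_ : List Int) (min_support : Int) : List (Int × Int) :=
  let items : PySem.Dict Int Int := pvItemsA sdb
  items.keys.foldl (fun freq_items item =>
      if min_support ≤ items.getD item 0 then freq_items ++ [(item, items.getD item 0)]
      else freq_items) []

-- ===== PORT B =====
-- B's support scan: sum(1 for s in entry_sets if item in s)
def pvSupportB (entry_sets : List (PySem.Set Int)) (item : Int) : Int :=
  entry_sets.foldl (fun acc s => if PySem.Set.contains s item then acc + 1 else acc) 0

-- literal port of B: order = list(dict.fromkeys(flattened)), entry_sets = the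
-- sequences as sets, then the item-major filtering append loop.
def local_freq_items_py_alt (sdb : List (List Int)) (prefix_ : List Int) (min_support : Int) : List (Int × Int) :=
  let order : List Int := PySem.List.dedup sdb.flatten
  let entry_sets : List (PySem.Set Int) := sdb.map PySem.Set.ofList
  order.foldl (fun freq_items item =>
      if min_support ≤ pvSupportB entry_sets item then freq_items ++ [(item, pvSupportB entry_sets item)]
      else freq_items) []

-- ===== PRECONDITION & SPEC =====
def Spec_local_freq_items_py (sdb : List (List Int)) (prefix_ : List Int) (min_support : Int) (out : List (Int × Int)) : Prop := out = local_freq_items_py_alt sdb prefix_ min_support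
instance (sdb : List (List Int)) (prefix_ : List Int) (min_support : Int) (out : List (Int × Int)) : Decidable (Spec_local_freq_items_py sdb prefix_ min_support out) := by unfold Spec_local_freq_items_py; infer_instance

-- ===== CLAIM =====
def Claim_equal_local_freq_items_py : Prop := ∀ (sdb : List (List Int)) (prefix_ : List Int) (min_support : Int), Dom_local_freq_items_py sdb prefix_ min_support → Spec_local_freq_items_py sdb prefix_ min_support (local_freq_items_py sdb prefix_ min_support)

-- ===== LEMMAS AND PROOFS =====

-- one entry of A's outer loop: the keys absorb the entry's elements in order, and each
-- count goes up by one exactly for the entry's fresh (non-visited) elements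
theorem pvEntryA (entry : List Int) (d : PySem.Dict Int Int) (v : PySem.Set Int)
    (hv : ∀ k : Int, k ∈ v → k ∈ d.keys) :
    ((entry.foldl pvStepA (d, v)).1).keys = PySem.Set.update d.keys entry ∧
    (∀ k : Int, ((entry.foldl pvStepA (d, v)).1).getD k 0 =
      d.getD k 0 + (if k ∉ v ∧ k ∈ entry then 1 else 0)) := by
  induction entry generalizing d v with
  | nil =>
    refine ⟨rfl, fun k => by simp⟩
  | cons e rest ih =>
    by_cases he : e ∈ v
    · have hstep : pvStepA (d, v) e = (d, v) := by
        simp only [pvStepA]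
        rw [if_pos ((PySem.Set.contains_iff v e).mpr he)]
      simp only [List.foldl_cons, hstep]
      obtain ⟨hk, hg⟩ := ih d v hv
      refine ⟨?_, ?_⟩
      · rw [hk, PySem.Set.update_cons, PySem.Set.add_of_mem (hv e he)]
      · intro k
        rw [hg k]
        by_cases hkv : k ∈ v
        · simp [hkv]
        · have hke : k ≠ e := fun h => hkv (h ▸ he)
          simp [hkv, hke]
    · have hstep : pvStepA (d, v) e = (d.modify e 0 (· + 1), PySem.Set.add v e) := by
        simp only [pvStepA]
        rw [if_neg (by simpa using he)]
      simp only [List.foldl_cons, hstep]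
      have hkeys' : (d.modify e 0 (· + 1)).keys = PySem.Set.add d.keys e := by
        rw [PySem.Dict.keys_modify]
        by_cases hc : d.contains e = true
        · rw [PySem.Dict.keys_insert_of_contains _ _ hc,
            PySem.Set.add_of_mem ((PySem.Dict.contains_iff_mem_keys d e).mp hc)]
        · have hc' : d.contains e = false := by simpa using hc
          rw [PySem.Dict.keys_insert_of_not_contains _ _ hc',
            PySem.Set.add_of_not_mem (fun h => by
              exact absurd ((PySem.Dict.contains_iff_mem_keys d e).mpr h) (by simp [hc']))]
      have hv' : ∀ k : Int, k ∈ PySem.Set.add v e → k ∈ (d.modify e 0 (· + 1)).keys := by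
        intro k hk
        rw [hkeys']
        rcases (PySem.Set.mem_add _ _ _).mp hk with h | h
        · exact (PySem.Set.mem_add _ _ _).mpr (Or.inl (hv k h))
        · exact (PySem.Set.mem_add _ _ _).mpr (Or.inr h)
      obtain ⟨hk, hg⟩ := ih (d.modify e 0 (· + 1)) (PySem.Set.add v e) hv'
      refine ⟨?_, ?_⟩
      · rw [hk, hkeys', PySem.Set.update_cons]
      · intro k
        rw [hg k, PySem.Dict.getD_modify]
        by_cases hke : k = e
        · subst hke
          simp [he]
        · have hmv : k ∈ PySem.Set.add v e ↔ k ∈ v := by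
            rw [PySem.Set.mem_add]
            exact ⟨fun h => h.resolve_right (fun h => hke h), Or.inl⟩
          by_cases hkv : k ∈ v
          · simp [hke, hmv.mpr hkv, hkv]
          · have hna : k ∉ PySem.Set.add v e := fun h => hkv (hmv.mp h)
            simp [hke, hna, hkv]

-- the whole database fold: keys are the ordered distinct items seen so far, each count is
-- the number of processed sequences containing the item
theorem pvDbA (sdb : List (List Int)) (d : PySem.Dict Int Int) :
    (sdb.foldl (fun items entry => (entry.foldl pvStepA (items, PySem.Set.empty)).1) d).keys =
      PySem.Set.update d.keys sdb.flatten ∧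
    (∀ k : Int,
      (sdb.foldl (fun items entry => (entry.foldl pvStepA (items, PySem.Set.empty)).1) d).getD k 0 =
      d.getD k 0 + ((sdb.countP (fun e => e.contains k)) : Int)) := by
  induction sdb generalizing d with
  | nil => exact ⟨rfl, fun k => by simp⟩
  | cons entry rest ih =>
    have hent := pvEntryA entry d PySem.Set.empty (fun k hk => by simp [PySem.Set.empty] at hk)
    obtain ⟨hk1, hg1⟩ := hent
    simp only [List.foldl_cons]
    obtain ⟨hk2, hg2⟩ := ih ((entry.foldl pvStepA (d, PySem.Set.empty)).1)
    refine ⟨?_, ?_⟩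
    · rw [hk2, hk1, List.flatten_cons, PySem.Set.update_append]
    · intro k
      rw [hg2 k, hg1 k]
      have hcp : ((entry :: rest).countP (fun e => e.contains k)) =
          rest.countP (fun e => e.contains k) + (if entry.contains k then 1 else 0) := by
        simp [List.countP_cons]
      rw [hcp]
      by_cases hke : k ∈ entry
      · simp only [PySem.Set.empty] at *
        simp [hke]
        ring
      · simp only [PySem.Set.empty] at *
        simp [hke]

-- B's support loop computes the same count
theorem pvSupportB_eq (sdb : List (List Int)) (k : Int) :
    pvSupportB (sdb.map PySem.Set.ofList) k = ((sdb.countP (fun e => e.contains k)) : Int) := by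
  unfold pvSupportB
  rw [PySem.List.foldl_if_add_one, List.countP_map]
  have hcp : sdb.countP ((fun s => PySem.Set.contains s k) ∘ PySem.Set.ofList) =
      sdb.countP (fun e => e.contains k) := by
    apply List.countP_congr
    intro e _
    by_cases h : k ∈ e <;>
      simp [h, Function.comp, PySem.Set.mem_ofList]
  rw [hcp]
  ring

-- ===== VERDICT =====
theorem local_freq_items_py_spec : Claim_equal_local_freq_items_py := by
  intro sdb prefix_ min_support _
  unfold Spec_local_freq_items_py local_freq_items_py local_freq_items_py_alt
  dsimp only
  obtain ⟨hkeys, hgetD⟩ := pvDbA sdb PySem.Dict.empty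
  rw [show (sdb.foldl (fun items entry => (entry.foldl pvStepA (items, PySem.Set.empty)).1)
      PySem.Dict.empty) = pvItemsA sdb from rfl] at hkeys hgetD
  have hkeys' : (pvItemsA sdb).keys = PySem.List.dedup sdb.flatten := by
    rw [hkeys, PySem.List.dedup_eq_ofList, PySem.Dict.keys_empty,
      PySem.Set.update_nil_left]
  have hcount : ∀ k : Int, (pvItemsA sdb).getD k 0 = pvSupportB (sdb.map PySem.Set.ofList) k := by
    intro k
    rw [hgetD k, pvSupportB_eq, PySem.Dict.getD_empty]
    ring
  rw [PySem.List.foldl_append_ite (p := fun item => min_support ≤ (pvItemsA sdb).getD item 0), PySem.List.foldl_append_ite (p := fun item => min_support ≤ pvSupportB (sdb.map PySem.Set.ofList) item), hkeys']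
  have hp : (fun item => decide (min_support ≤ (pvItemsA sdb).getD item 0)) =
      (fun item => decide (min_support ≤ pvSupportB (sdb.map PySem.Set.ofList) item)) := by
    funext item; rw [hcount item]
  have hf : (fun item : Int => (item, (pvItemsA sdb).getD item 0)) =
      (fun item : Int => (item, pvSupportB (sdb.map PySem.Set.ofList) item)) := by
    funext item; rw [hcount item]
  rw [hp, hf]
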